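-- pv_equiv track=rewrite | github.com/ldhbenecia/Algorithm | 프로그래머스/2/172927. 광물 캐기/광물 캐기.py | solution
-- ===== SOURCE A (Python) =====
-- def solution(picks, minerals):
--     answer = 0
--
--     minerals = minerals[:sum(picks)*5]
--     minerals = [minerals[i:i+5] for i in range(0, len(minerals), 5)]
--
--     costs = []
--     for mineral in minerals:
--         cost = [0, 0, 0] # dia, iron, stone
--         for mine in mineral:
--             if mine == 'diamond':
--                 cost[0] += 1
--                 cost[1] += 5
--                 cost[2] += 25
--             elif mine == 'iron':
--                 cost[0] += 1
--                 cost[1] += 1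
--                 cost[2] += 5
--             else:
--                 cost[0] += 1
--                 cost[1] += 1
--                 cost[2] += 1
--         costs.append(cost)
--
--     # 낮은 등급의 곡괭이 점수를 기준으로 내림차순 정렬
--     costs.sort(key=lambda x:(-x[2],-x[1]))
--
--     for cost in costs:
--         for i in range(3):
--             if picks[i] > 0:
--                 answer += cost[i]
--                 picks[i] -= 1
--                 break
--
--     return answer
-- ===== SOURCE B (Python) =====
-- def solution(picks, minerals):
--     minerals = minerals[:sum(picks) * 5]
--     # bucket the 5-mineral groups by their bounded (stone, iron) cost key:
--     # a counting-sort over the fixed key grid replaces the comparison sort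
--     buckets = {}
--     for i in range(0, len(minerals), 5):
--         chunk = minerals[i:i + 5]
--         d = chunk.count('diamond')
--         r = chunk.count('iron')
--         L = len(chunk)
--         key = (24 * d + 4 * r + L, 4 * d + L)  # (stone cost, iron cost)
--         buckets.setdefault(key, []).append(L)  # L is the diamond cost
--     caps = [max(p, 0) for p in picks[:3]]
--     caps += [0] * (3 - len(caps))
--     r0, r1, r2 = caps
--     answer = 0
--     for s in reversed(range(1, 126)):
--         for it in reversed(range(1, 26)):
--             dias = buckets.get((s, it), [])
--             if dias:
--                 m = len(dias)
--                 k0 = min(r0, m)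
--                 k1 = min(r1, m - k0)
--                 k2 = min(r2, m - k0 - k1)
--                 answer += sum(dias[:k0]) + k1 * it + k2 * s
--                 r0 -= k0
--                 r1 -= k1
--                 r2 -= k2
--     return answer
-- ===== Notes on version B (the rewrite author's own statement) =====
-- stated objective: alternative
-- what changed: B replaces A's comparison sort + per-group first-positive-pick greedy by a counting-sort style algorithm: groups are bucketed in a dict keyed by their bounded (stone, iron) cost, then a single sweep over the fixed 125x25 key grid in descending order assigns whole blocks of picks per bucket with min/sum arithmetic; B does not mutate picks (return-value equivalence).
import Mathlib
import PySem

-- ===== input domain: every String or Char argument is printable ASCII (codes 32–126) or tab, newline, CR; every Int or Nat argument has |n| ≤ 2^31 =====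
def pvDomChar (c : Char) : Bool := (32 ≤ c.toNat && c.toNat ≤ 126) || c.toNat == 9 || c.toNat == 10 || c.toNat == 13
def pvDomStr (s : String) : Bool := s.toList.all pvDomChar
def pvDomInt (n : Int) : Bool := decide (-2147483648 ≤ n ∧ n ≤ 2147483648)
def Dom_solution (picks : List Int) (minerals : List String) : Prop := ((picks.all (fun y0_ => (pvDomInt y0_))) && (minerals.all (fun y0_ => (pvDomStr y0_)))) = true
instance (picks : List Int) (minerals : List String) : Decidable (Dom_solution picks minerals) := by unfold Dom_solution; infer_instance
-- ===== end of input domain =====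

-- B replaces A's comparison sort + first-positive-pick greedy by a counting-sort
-- style bucket sweep over the bounded (stone, iron) cost grid (objective: alternative).
-- A mutates `picks` in place; B does not — the equivalence proved here is about
-- the RETURN value only.

-- ===== PORT A =====
def pvCostStepA (c : Int × Int × Int) (m : String) : Int × Int × Int :=
  if m = "diamond" then (c.1 + 1, c.2.1 + 5, c.2.2 + 25)
  else if m = "iron" then (c.1 + 1, c.2.1 + 1, c.2.2 + 5)
  else (c.1 + 1, c.2.1 + 1, c.2.2 + 1)

-- 'for i in range(3): if picks[i] > 0: … break' — reads picks[i] via pyGetD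
-- (default 0: out of range only outside Pre_solution, where Python raises)
def pvStepA (st : Int × List Int) (cost : Int × Int × Int) : Int × List Int :=
  if PySem.List.pyGetD st.2 0 0 > 0 then
    (st.1 + cost.1, PySem.List.pySetD st.2 0 (PySem.List.pyGetD st.2 0 0 - 1))
  else if PySem.List.pyGetD st.2 1 0 > 0 then
    (st.1 + cost.2.1, PySem.List.pySetD st.2 1 (PySem.List.pyGetD st.2 1 0 - 1))
  else if PySem.List.pyGetD st.2 2 0 > 0 then
    (st.1 + cost.2.2, PySem.List.pySetD st.2 2 (PySem.List.pyGetD st.2 2 0 - 1))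
  else st

def solution (picks : List Int) (minerals : List String) : Int :=
  let ms := PySem.List.slice minerals none (some (picks.sum * 5))
  let chunks := (PySem.List.pyRange 0 (ms.length : Int) 5).map
    (fun i => PySem.List.slice ms (some i) (some (i + 5)))
  let costs := chunks.foldl (fun acc mineral => acc ++ [mineral.foldl pvCostStepA (0, 0, 0)]) []
  let sortedC := PySem.List.sorted2 costs (fun x => -x.2.2) (fun x => -x.2.1)
  (sortedC.foldl pvStepA (0, picks)).1

-- ===== PORT B =====
def solution_alt (picks : List Int) (minerals : List String) : Int :=
  let ms := PySem.List.slice minerals none (some (picks.sum * 5))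
  -- bucket the 5-mineral groups by their bounded (stone, iron) cost key
  let buckets := (PySem.List.pyRange 0 (ms.length : Int) 5).foldl
    (fun d i =>
      let chunk := PySem.List.slice ms (some i) (some (i + 5))
      let dd : Int := PySem.List.count chunk "diamond"
      let r : Int := PySem.List.count chunk "iron"
      let L : Int := (chunk.length : Int)
      PySem.Dict.modify d (24 * dd + 4 * r + L, 4 * dd + L) [] (· ++ [L]))
    PySem.Dict.empty
  let caps0 := (PySem.List.slice picks none (some 3)).map (fun p => max p 0)
  let caps := caps0 ++ PySem.List.pyRepeat [(0 : Int)] (3 - (caps0.length : Int))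
  let r0 := PySem.List.pyGetD caps 0 0
  let r1 := PySem.List.pyGetD caps 1 0
  let r2 := PySem.List.pyGetD caps 2 0
  -- counting-sort sweep: fixed key grid, descending, block assignment per bucket
  let st := ((PySem.List.pyRange 1 126 1).reverse).foldl
    (fun st s =>
      ((PySem.List.pyRange 1 26 1).reverse).foldl
        (fun st it =>
          let dias := PySem.Dict.getD buckets (s, it) []
          if dias ≠ [] then
            let m : Int := (dias.length : Int)
            let k0 := min st.2.1 m
            let k1 := min st.2.2.1 (m - k0)
            let k2 := min st.2.2.2 (m - k0 - k1)
            (st.1 + (PySem.List.slice dias none (some k0)).sum + k1 * it + k2 * s,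
             st.2.1 - k0, st.2.2.1 - k1, st.2.2.2 - k2)
          else st) st)
    ((0 : Int), r0, r1, r2)
  st.1

-- ===== PRECONDITION & SPEC =====
-- Pre_ excludes exactly the inputs where Python A raises IndexError: len(picks) < 3
-- and (because a negative sum(picks) makes minerals[:sum(picks)*5] a *suffix-dropping*
-- slice, so mineral groups can outnumber the positive picks) the greedy loop runs out
-- of positive picks while groups remain, so `picks[i]` steps past the short list.
def Pre_solution (picks : List Int) (minerals : List String) : Prop :=
  3 ≤ picks.length ∨
    (let stop : Int := picks.sum * 5
     let sl : Int := if 0 ≤ stop then min (minerals.length : Int) stop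
                     else max ((minerals.length : Int) + stop) 0
     (sl + 4) / 5 ≤ (picks.map (fun p => max p 0)).sum)
instance (picks : List Int) (minerals : List String) : Decidable (Pre_solution picks minerals) := by
  unfold Pre_solution; infer_instance
def pvWitness_solution : List Int × List String := ([1, 1, 1], ["diamond", "stone"])

def Spec_solution (picks : List Int) (minerals : List String) (out : Int) : Prop := out = solution_alt picks minerals
instance (picks : List Int) (minerals : List String) (out : Int) : Decidable (Spec_solution picks minerals out) := by unfold Spec_solution; infer_instance

-- ===== CLAIM (what is proved, stated in full; the proofs are below) =====
def Claim_equal_solution : Prop := ∀ (picks : List Int) (minerals : List String), Dom_solution picks minerals → Pre_solution picks minerals → Spec_solution picks minerals (solution picks minerals)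

-- ===== LEMMAS AND PROOFS =====

-- small evaluation lemmas for PySem indexing/assignment on the list shapes the ports reach
theorem pvSet0 {α : Type} (x v : α) (xs : List α) : PySem.List.pySetD (x::xs) 0 v = v::xs := by
  simp [PySem.List.pySetD, PySem.List.pySet?, PySem.List.pyIdx?]
theorem pvSet1 {α : Type} (x y v : α) (xs : List α) : PySem.List.pySetD (x::y::xs) 1 v = x::v::xs := by
  simp [PySem.List.pySetD, PySem.List.pySet?, PySem.List.pyIdx?]
theorem pvSet2 {α : Type} (x y z v : α) (xs : List α) : PySem.List.pySetD (x::y::z::xs) 2 v = x::y::v::xs := by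
  simp [PySem.List.pySetD, PySem.List.pySet?, PySem.List.pyIdx?]
  rw [if_pos (by omega)]
  rfl
theorem pvGet0 {α : Type} (x d : α) (xs : List α) : PySem.List.pyGetD (x::xs) 0 d = x := by simp [pysem]
theorem pvGet1 {α : Type} (x y d : α) (xs : List α) : PySem.List.pyGetD (x::y::xs) 1 d = y := by simp [pysem]
theorem pvGet2 {α : Type} (x y z d : α) (xs : List α) : PySem.List.pyGetD (x::y::z::xs) 2 d = z := by simp [pysem]
theorem pvGetN {α : Type} (i : Int) (d : α) : PySem.List.pyGetD ([] : List α) i d = d := by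
  simp [PySem.List.pyGetD, PySem.List.pyGet?, PySem.List.pyIdx?]
theorem pvGet1' {α : Type} (x d : α) : PySem.List.pyGetD [x] 1 d = d := by simp [pysem]
theorem pvGet2' {α : Type} (x d : α) : PySem.List.pyGetD [x] 2 d = d := by simp [pysem]
theorem pvGet2'' {α : Type} (x y d : α) : PySem.List.pyGetD [x,y] 2 d = d := by simp [pysem]

-- index-position view of a tiered assignment: element at position k gets the
-- diamond column below b0, the iron column below b1, the stone column below b2
def pvGo : List (Int × Int × Int) → Int → Int → Int → Int → Int
  | [], _, _, _, _ => 0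
  | c :: cs, k, b0, b1, b2 =>
    (if k < b0 then c.1 else if k < b1 then c.2.1 else if k < b2 then c.2.2 else 0)
      + pvGo cs (k + 1) b0 b1 b2

-- the number of picks of grade i still available (0 when the entry is missing or negative)
def pvCap (picks : List Int) (i : Int) : Int := max (PySem.List.pyGetD picks i 0) 0

theorem pvCap0 (x : Int) (xs : List Int) : pvCap (x::xs) 0 = max x 0 := by simp [pvCap, pysem]
theorem pvCap1 (x y : Int) (xs : List Int) : pvCap (x::y::xs) 1 = max y 0 := by simp [pvCap, pysem]
theorem pvCap2 (x y z : Int) (xs : List Int) : pvCap (x::y::z::xs) 2 = max z 0 := by simp [pvCap, pysem]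
theorem pvCapN0 : pvCap [] 0 = 0 := by decide
theorem pvCapN1 : pvCap [] 1 = 0 := by decide
theorem pvCapN2 : pvCap [] 2 = 0 := by decide
theorem pvCapS1 (x : Int) : pvCap [x] 1 = 0 := by simp [pvCap, pysem]
theorem pvCapS2 (x : Int) : pvCap [x] 2 = 0 := by simp [pvCap, pysem]
theorem pvCapD2 (x y : Int) : pvCap [x,y] 2 = 0 := by simp [pvCap, pysem]

theorem pvGo_shift (b0 b1 b2 : Int) :
    ∀ (cs : List (Int × Int × Int)) (k : Int),
      pvGo cs (k + 1) b0 b1 b2 = pvGo cs k (b0 - 1) (b1 - 1) (b2 - 1) := by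
  intro cs
  induction cs with
  | nil => intro k; simp [pvGo]
  | cons c cs ih =>
    intro k
    simp only [pvGo]
    rw [ih (k + 1)]
    congr 1
    split_ifs <;> omega

theorem pvGo_congr :
    ∀ (cs : List (Int × Int × Int)) (k b0 b0' b1 b1' b2 b2' : Int),
      (b0 = b0' ∨ (b0 ≤ k ∧ b0' ≤ k)) →
      (b1 = b1' ∨ (b1 ≤ k ∧ b1' ≤ k)) →
      (b2 = b2' ∨ (b2 ≤ k ∧ b2' ≤ k)) →
      pvGo cs k b0 b1 b2 = pvGo cs k b0' b1' b2' := by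
  intro cs
  induction cs with
  | nil => intros; simp [pvGo]
  | cons c cs ih =>
    intro k b0 b0' b1 b1' b2 b2' h0 h1 h2
    simp only [pvGo]
    rw [ih (k + 1) b0 b0' b1 b1' b2 b2' (by omega) (by omega) (by omega)]
    congr 1
    rcases h0 with rfl | ⟨ha0, hb0⟩ <;> rcases h1 with rfl | ⟨ha1, hb1⟩ <;>
      rcases h2 with rfl | ⟨ha2, hb2⟩ <;> split_ifs <;> omega

-- one step of the position view against one consumed (or skipped) pick of A's greedy
theorem pvGo_step (c : Int × Int × Int) (cs : List (Int × Int × Int)) (b0 b1 b2 b0' b1' b2' v : Int)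
    (h : (0 < b0 ∧ v = c.1 ∧ b0' = b0 - 1 ∧ b1' = b1 - 1 ∧ b2' = b2 - 1)
       ∨ (b0 ≤ 0 ∧ 0 < b1 ∧ v = c.2.1 ∧ b0' = 0 ∧ b1' = b1 - 1 ∧ b2' = b2 - 1)
       ∨ (b0 ≤ 0 ∧ b1 ≤ 0 ∧ 0 < b2 ∧ v = c.2.2 ∧ b0' = 0 ∧ b1' = 0 ∧ b2' = b2 - 1)
       ∨ (b0 ≤ 0 ∧ b1 ≤ 0 ∧ b2 ≤ 0 ∧ v = 0 ∧ b0' = 0 ∧ b1' = 0 ∧ b2' = 0)) :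
    pvGo (c :: cs) 0 b0 b1 b2 = v + pvGo cs 0 b0' b1' b2' := by
  simp only [pvGo]
  rw [pvGo_shift]
  rw [pvGo_congr cs 0 (b0 - 1) b0' (b1 - 1) b1' (b2 - 1) b2' (by omega) (by omega) (by omega)]
  congr 1
  split_ifs <;> omega

-- A's mutating first-positive-pick greedy computes the position view
theorem pvGreedy_go :
    ∀ (cs : List (Int × Int × Int)) (picks : List Int) (a : Int),
      (cs.foldl pvStepA (a, picks)).1
        = a + pvGo cs 0 (pvCap picks 0) (pvCap picks 0 + pvCap picks 1)
            (pvCap picks 0 + pvCap picks 1 + pvCap picks 2) := by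
  intro cs
  induction cs with
  | nil => intro picks a; simp [pvGo]
  | cons c cs ih =>
    intro picks a
    simp only [List.foldl_cons]
    rcases picks with _ | ⟨p0, _ | ⟨p1, _ | ⟨p2, t⟩⟩⟩
    · have hstep : pvStepA (a, ([]:List Int)) c = (a, []) := by
        simp only [pvStepA, pvGetN]
        rw [if_neg (by omega), if_neg (by omega), if_neg (by omega)]
      rw [hstep, ih]
      simp only [pvCapN0, pvCapN1, pvCapN2]
      rw [pvGo_step c cs 0 (0+0) (0+0+0) 0 (0+0) (0+0+0) 0 (Or.inr (Or.inr (Or.inr (by omega))))]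
      ring
    · by_cases h0 : p0 > 0
      · have hstep : pvStepA (a, [p0]) c = (a + c.1, [p0-1]) := by
          simp only [pvStepA, pvGet0, pvGet1', pvGet2', pvSet0]
          rw [if_pos h0]
        rw [hstep, ih]
        simp only [pvCap0, pvCapS1, pvCapS2]
        rw [pvGo_step c cs (max p0 0) (max p0 0 + 0) (max p0 0 + 0 + 0)
          (max (p0-1) 0) (max (p0-1) 0 + 0) (max (p0-1) 0 + 0 + 0) c.1
          (Or.inl ⟨by omega, rfl, by omega, by omega, by omega⟩)]
        ring
      · have hstep : pvStepA (a, [p0]) c = (a, [p0]) := by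
          simp only [pvStepA, pvGet0, pvGet1', pvGet2']
          rw [if_neg h0, if_neg (by omega), if_neg (by omega)]
        rw [hstep, ih]
        simp only [pvCap0, pvCapS1, pvCapS2]
        rw [pvGo_step c cs (max p0 0) (max p0 0 + 0) (max p0 0 + 0 + 0)
          (max p0 0) (max p0 0 + 0) (max p0 0 + 0 + 0) 0
          (Or.inr (Or.inr (Or.inr (by omega))))]
        ring
    · by_cases h0 : p0 > 0
      · have hstep : pvStepA (a, [p0, p1]) c = (a + c.1, [p0-1, p1]) := by
          simp only [pvStepA, pvGet0, pvGet1, pvGet2'', pvSet0]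
          rw [if_pos h0]
        rw [hstep, ih]
        simp only [pvCap0, pvCap1, pvCapD2]
        rw [pvGo_step c cs (max p0 0) (max p0 0 + max p1 0) (max p0 0 + max p1 0 + 0)
          (max (p0-1) 0) (max (p0-1) 0 + max p1 0) (max (p0-1) 0 + max p1 0 + 0) c.1
          (Or.inl ⟨by omega, rfl, by omega, by omega, by omega⟩)]
        ring
      · by_cases h1 : p1 > 0
        · have hstep : pvStepA (a, [p0, p1]) c = (a + c.2.1, [p0, p1-1]) := by
            simp only [pvStepA, pvGet0, pvGet1, pvGet2'', pvSet1]
            rw [if_neg h0, if_pos h1]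
          rw [hstep, ih]
          simp only [pvCap0, pvCap1, pvCapD2]
          rw [pvGo_step c cs (max p0 0) (max p0 0 + max p1 0) (max p0 0 + max p1 0 + 0)
            (max p0 0) (max p0 0 + max (p1-1) 0) (max p0 0 + max (p1-1) 0 + 0) c.2.1
            (Or.inr (Or.inl ⟨by omega, by omega, rfl, by omega, by omega, by omega⟩))]
          ring
        · have hstep : pvStepA (a, [p0, p1]) c = (a, [p0, p1]) := by
            simp only [pvStepA, pvGet0, pvGet1, pvGet2'']
            rw [if_neg h0, if_neg h1, if_neg (by omega)]
          rw [hstep, ih]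
          simp only [pvCap0, pvCap1, pvCapD2]
          rw [pvGo_step c cs (max p0 0) (max p0 0 + max p1 0) (max p0 0 + max p1 0 + 0)
            (max p0 0) (max p0 0 + max p1 0) (max p0 0 + max p1 0 + 0) 0
            (Or.inr (Or.inr (Or.inr (by omega))))]
          ring
    · by_cases h0 : p0 > 0
      · have hstep : pvStepA (a, p0::p1::p2::t) c = (a + c.1, (p0-1)::p1::p2::t) := by
          simp only [pvStepA, pvGet0, pvGet1, pvGet2, pvSet0]
          rw [if_pos h0]
        rw [hstep, ih]
        simp only [pvCap0, pvCap1, pvCap2]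
        rw [pvGo_step c cs (max p0 0) (max p0 0 + max p1 0) (max p0 0 + max p1 0 + max p2 0)
          (max (p0-1) 0) (max (p0-1) 0 + max p1 0) (max (p0-1) 0 + max p1 0 + max p2 0) c.1
          (Or.inl ⟨by omega, rfl, by omega, by omega, by omega⟩)]
        ring
      · by_cases h1 : p1 > 0
        · have hstep : pvStepA (a, p0::p1::p2::t) c = (a + c.2.1, p0::(p1-1)::p2::t) := by
            simp only [pvStepA, pvGet0, pvGet1, pvGet2, pvSet1]
            rw [if_neg h0, if_pos h1]
          rw [hstep, ih]
          simp only [pvCap0, pvCap1, pvCap2]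
          rw [pvGo_step c cs (max p0 0) (max p0 0 + max p1 0) (max p0 0 + max p1 0 + max p2 0)
            (max p0 0) (max p0 0 + max (p1-1) 0) (max p0 0 + max (p1-1) 0 + max p2 0) c.2.1
            (Or.inr (Or.inl ⟨by omega, by omega, rfl, by omega, by omega, by omega⟩))]
          ring
        · by_cases h2 : p2 > 0
          · have hstep : pvStepA (a, p0::p1::p2::t) c = (a + c.2.2, p0::p1::(p2-1)::t) := by
              simp only [pvStepA, pvGet0, pvGet1, pvGet2, pvSet2]
              rw [if_neg h0, if_neg h1, if_pos h2]
            rw [hstep, ih]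
            simp only [pvCap0, pvCap1, pvCap2]
            rw [pvGo_step c cs (max p0 0) (max p0 0 + max p1 0) (max p0 0 + max p1 0 + max p2 0)
              (max p0 0) (max p0 0 + max p1 0) (max p0 0 + max p1 0 + max (p2-1) 0) c.2.2
              (Or.inr (Or.inr (Or.inl ⟨by omega, by omega, by omega, rfl, by omega, by omega, by omega⟩)))]
            ring
          · have hstep : pvStepA (a, p0::p1::p2::t) c = (a, p0::p1::p2::t) := by
              simp only [pvStepA, pvGet0, pvGet1, pvGet2]
              rw [if_neg h0, if_neg h1, if_neg h2]
            rw [hstep, ih]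
            simp only [pvCap0, pvCap1, pvCap2]
            rw [pvGo_step c cs (max p0 0) (max p0 0 + max p1 0) (max p0 0 + max p1 0 + max p2 0)
              (max p0 0) (max p0 0 + max p1 0) (max p0 0 + max p1 0 + max p2 0) 0
              (Or.inr (Or.inr (Or.inr (by omega))))]
            ring

-- each chunk's cost triple in closed form: (length, length+4·#dia, length+4·#iron+24·#dia)
theorem pvCostA_fold :
    ∀ (chunk : List String) (x y z : Int),
      chunk.foldl pvCostStepA (x, y, z)
        = (x + (chunk.length : Int),
           y + (chunk.length : Int) + 4 * (List.count "diamond" chunk : Int),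
           z + (chunk.length : Int) + 4 * (List.count "iron" chunk : Int)
             + 24 * (List.count "diamond" chunk : Int)) := by
  intro chunk
  induction chunk with
  | nil => intro x y z; simp
  | cons m ms ih =>
    intro x y z
    simp only [List.foldl_cons, pvCostStepA]
    by_cases hd : m = "diamond"
    · subst hd
      rw [if_pos rfl, ih]
      simp only [List.count_cons, List.length_cons, Prod.mk.injEq]
      norm_num
      omega
    · rw [if_neg hd]
      by_cases hi : m = "iron"
      · subst hi
        rw [if_pos rfl, ih]
        simp only [List.count_cons, List.length_cons, Prod.mk.injEq]
        norm_num
        omega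
      · rw [if_neg hi, ih]
        simp only [List.count_cons, List.length_cons, Prod.mk.injEq, beq_iff_eq, hd, hi,
          if_false]
        push_cast
        omega

def pvKey (c : Int × Int × Int) : Int × Int := (c.2.2, c.2.1)
def pvLt (a b : Int × Int × Int) : Bool :=
  decide (-a.2.2 < -b.2.2) || (!decide (-b.2.2 < -a.2.2) && decide (-a.2.1 < -b.2.1))
def pvGt (a b : Int × Int) : Prop := b.1 < a.1 ∨ (b.1 = a.1 ∧ b.2 < a.2)

theorem pvLt_iff (a b : Int × Int × Int) : pvLt a b = true ↔ pvGt (pvKey a) (pvKey b) := by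
  simp only [pvLt, pvGt, pvKey, Bool.or_eq_true, Bool.and_eq_true, Bool.not_eq_true',
    decide_eq_true_eq, decide_eq_false_iff_not]
  constructor
  · rintro (h | ⟨h1, h2⟩) <;> omega
  · rintro (h | ⟨h1, h2⟩) <;> omega

theorem pvGt_ne {a b : Int × Int} (h : pvGt a b) : b ≠ a := by
  simp only [pvGt] at h
  intro he
  subst he
  omega

theorem pvInsert_append (x : Int × Int × Int) :
    ∀ (pre rest : List (Int × Int × Int)), (∀ y ∈ pre, pvLt x y = false) →
      PySem.List.insertBy pvLt x (pre ++ rest) = pre ++ PySem.List.insertBy pvLt x rest := by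
  intro pre
  induction pre with
  | nil => intro rest _; simp
  | cons y ys ih =>
    intro rest h
    simp only [List.cons_append, PySem.List.insertBy]
    rw [h y (by simp)]
    simp only [Bool.false_eq_true, if_false]
    rw [ih rest (fun z hz => h z (by simp [hz]))]

theorem pvInsert_front (x : Int × Int × Int) (rest : List (Int × Int × Int))
    (h : ∀ y ∈ rest, pvLt x y = true) :
    PySem.List.insertBy pvLt x rest = x :: rest := by
  cases rest with
  | nil => rfl
  | cons y ys =>
    simp only [PySem.List.insertBy]
    rw [h y (by simp)]
    simp

theorem pvInsert_flatMap (K : List (Int × Int)) (xs : List (Int × Int × Int))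
    (x : Int × Int × Int) (hmem : pvKey x ∈ K) (hpw : K.Pairwise pvGt) :
    PySem.List.insertBy pvLt x
      (K.flatMap (fun k => xs.filter (fun c => pvKey c = k)))
    = K.flatMap (fun k => (xs ++ [x]).filter (fun c => pvKey c = k)) := by
  induction K with
  | nil => simp at hmem
  | cons k K' ih =>
    have hhd : ∀ k' ∈ K', pvGt k k' := (List.pairwise_cons.mp hpw).1
    have hpw' : K'.Pairwise pvGt := (List.pairwise_cons.mp hpw).2
    simp only [List.flatMap_cons]
    rcases List.mem_cons.mp hmem with hx | hx
    · -- x belongs to the head bucket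
      have hpre : ∀ y ∈ xs.filter (fun c => pvKey c = k), pvLt x y = false := by
        intro y hy
        have hk : pvKey y = k := by simpa using (List.mem_filter.mp hy).2
        rw [Bool.eq_false_iff]
        intro hlt
        have h2 := (pvLt_iff x y).mp hlt
        rw [hk, hx] at h2
        simp only [pvGt] at h2
        omega
      have hrest : ∀ y ∈ K'.flatMap (fun k => xs.filter (fun c => pvKey c = k)),
          pvLt x y = true := by
        intro y hy
        rcases List.mem_flatMap.mp hy with ⟨k', hk', hyf⟩
        have hky : pvKey y = k' := by simpa using (List.mem_filter.mp hyf).2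
        rw [pvLt_iff, hky, hx]
        exact hhd k' hk'
      rw [pvInsert_append x _ _ hpre, pvInsert_front x _ hrest]
      have hhead : (xs ++ [x]).filter (fun c => pvKey c = k)
          = xs.filter (fun c => pvKey c = k) ++ [x] := by
        rw [List.filter_append]
        simp [hx]
      have htail : K'.flatMap (fun k' => (xs ++ [x]).filter (fun c => pvKey c = k'))
          = K'.flatMap (fun k' => xs.filter (fun c => pvKey c = k')) := by
        simp only [List.flatMap]
        congr 1
        apply List.map_congr_left
        intro k' hk'
        rw [List.filter_append]
        have hne : ¬ (pvKey x = k') := by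
          rw [hx]
          exact (pvGt_ne (hhd k' hk')).symm
        simp [hne]
      rw [hhead, htail]
      simp
    · -- x belongs to a later bucket
      have hgt : pvGt k (pvKey x) := hhd _ hx
      have hpre : ∀ y ∈ xs.filter (fun c => pvKey c = k), pvLt x y = false := by
        intro y hy
        have hk : pvKey y = k := by simpa using (List.mem_filter.mp hy).2
        rw [Bool.eq_false_iff]
        intro hlt
        have h2 := (pvLt_iff x y).mp hlt
        rw [hk] at h2
        simp only [pvGt] at h2 hgt
        omega
      rw [pvInsert_append x _ _ hpre, ih hx hpw']
      have hhead : (xs ++ [x]).filter (fun c => pvKey c = k)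
          = xs.filter (fun c => pvKey c = k) := by
        rw [List.filter_append]
        have hne : ¬ (pvKey x = k) := pvGt_ne hgt
        simp [hne]
      rw [hhead]

theorem pvSorted_eq_flatMap (xs : List (Int × Int × Int)) (K : List (Int × Int))
    (hpw : K.Pairwise pvGt) (hmem : ∀ c ∈ xs, pvKey c ∈ K) :
    PySem.List.sorted2 xs (fun x => -x.2.2) (fun x => -x.2.1)
      = K.flatMap (fun k => xs.filter (fun c => pvKey c = k)) := by
  induction xs using List.reverseRecOn with
  | nil =>
    simp only [PySem.List.sorted2, List.foldl_nil, List.filter_nil]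
    exact (List.flatMap_eq_nil_iff.mpr (by simp)).symm
  | append_singleton xs x ih =>
    have hx : pvKey x ∈ K := hmem x (by simp)
    have hxs : ∀ c ∈ xs, pvKey c ∈ K := fun c hc => hmem c (by simp [hc])
    have hfold : PySem.List.sorted2 (xs ++ [x]) (fun x => -x.2.2) (fun x => -x.2.1)
        = PySem.List.insertBy pvLt x
            (PySem.List.sorted2 xs (fun x => -x.2.2) (fun x => -x.2.1)) := by
      simp only [PySem.List.sorted2, Bool.false_eq_true, if_false, List.foldl_append,
        List.foldl_cons, List.foldl_nil]
      rfl
    rw [hfold, ih hxs, pvInsert_flatMap K xs x hx hpw]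

theorem pvGo_append (xs ys : List (Int × Int × Int)) :
    ∀ (k b0 b1 b2 : Int),
      pvGo (xs ++ ys) k b0 b1 b2 = pvGo xs k b0 b1 b2 + pvGo ys (k + xs.length) b0 b1 b2 := by
  induction xs with
  | nil => intro k b0 b1 b2; simp [pvGo]
  | cons c cs ih =>
    intro k b0 b1 b2
    simp only [List.cons_append, pvGo, List.length_cons, ih]
    push_cast
    ring_nf

theorem pvGo_shiftn (ys : List (Int × Int × Int)) :
    ∀ (m : Nat) (k b0 b1 b2 : Int),
      pvGo ys (k + m) b0 b1 b2 = pvGo ys k (b0 - m) (b1 - m) (b2 - m) := by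
  intro m
  induction m with
  | zero => intro k b0 b1 b2; simp
  | succ n ih =>
    intro k b0 b1 b2
    have h : (k + ((n + 1 : Nat) : Int) : Int) = (k + 1) + (n : Int) := by push_cast; ring
    rw [h, ih, pvGo_shift]
    apply pvGo_congr <;> (left; push_cast; ring)

-- one bucket, processed as a block
theorem pvGo_block (it s : Int) :
    ∀ (dias : List Int) (r0 r1 r2 : Int), 0 ≤ r0 → 0 ≤ r1 → 0 ≤ r2 →
      pvGo (dias.map (fun L => (L, it, s))) 0 r0 (r0 + r1) (r0 + r1 + r2)
        = (PySem.List.slice dias none (some (min r0 (dias.length : Int)))).sum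
          + min r1 ((dias.length : Int) - min r0 (dias.length : Int)) * it
          + min r2 ((dias.length : Int) - min r0 (dias.length : Int)
              - min r1 ((dias.length : Int) - min r0 (dias.length : Int))) * s := by
  intro dias
  induction dias with
  | nil =>
    intro r0 r1 r2 h0 h1 h2
    have e0 : min r0 ((0:Int)) = 0 := by omega
    simp only [List.map_nil, pvGo, List.length_nil, Int.natCast_zero, e0]
    have e1 : min r1 ((0:Int) - 0) = 0 := by omega
    rw [PySem.List.slice_to (xs := ([] : List Int)) (by omega), e1]
    have e2 : min r2 ((0:Int) - 0 - 0) = 0 := by omega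
    rw [e2]
    simp
  | cons L ds ih =>
    intro r0 r1 r2 h0 h1 h2
    have hlen : ((L :: ds).length : Int) = (ds.length : Int) + 1 := by rw [List.length_cons]; push_cast; ring
    simp only [List.map_cons, pvGo, hlen]
    rw [pvGo_shift]
    rcases lt_or_ge 0 r0 with hr0 | hr0
    · -- a diamond pick is available
      have hb : pvGo (ds.map (fun L => (L, it, s))) 0 (r0 - 1) (r0 + r1 - 1) (r0 + r1 + r2 - 1)
          = pvGo (ds.map (fun L => (L, it, s))) 0 (r0 - 1) ((r0 - 1) + r1) (((r0 - 1) + r1) + r2) := by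
        apply pvGo_congr <;> omega
      rw [if_pos hr0, hb, ih (r0 - 1) r1 r2 (by omega) h1 h2]
      have hk0 : min r0 ((ds.length : Int) + 1) = min (r0 - 1) (ds.length : Int) + 1 := by omega
      have hk0n : (min (r0 - 1) (ds.length : Int) + 1).toNat
          = (min (r0 - 1) (ds.length : Int)).toNat + 1 := by omega
      rw [hk0,
        PySem.List.slice_to (xs := L :: ds) (b := min (r0 - 1) ((ds.length : Int)) + 1) (by omega),
        PySem.List.slice_to (xs := ds) (b := min (r0 - 1) ((ds.length : Int))) (by omega),
        hk0n, List.take_succ_cons, List.sum_cons]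
      have m1 : min r1 ((ds.length : Int) + 1 - (min (r0 - 1) (ds.length : Int) + 1))
          = min r1 ((ds.length : Int) - min (r0 - 1) (ds.length : Int)) := by omega
      rw [m1]
      have m2 : min r2 ((ds.length : Int) + 1 - (min (r0 - 1) (ds.length : Int) + 1)
            - min r1 ((ds.length : Int) - min (r0 - 1) (ds.length : Int)))
          = min r2 ((ds.length : Int) - min (r0 - 1) (ds.length : Int)
            - min r1 ((ds.length : Int) - min (r0 - 1) (ds.length : Int))) := by omega
      rw [m2]
      ring
    · have hr0' : r0 = 0 := by omega
      subst hr0'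
      rcases lt_or_ge 0 r1 with hr1 | hr1
      · -- an iron pick is available
        have hb : pvGo (ds.map (fun L => (L, it, s))) 0 (0 - 1) (0 + r1 - 1) (0 + r1 + r2 - 1)
            = pvGo (ds.map (fun L => (L, it, s))) 0 0 (0 + (r1 - 1)) ((0 + (r1 - 1)) + r2) := by
          apply pvGo_congr <;> omega
        rw [if_neg (by omega), if_pos (by omega), hb, ih 0 (r1 - 1) r2 (by omega) (by omega) h2]
        have hk0 : min (0:Int) ((ds.length : Int) + 1) = 0 := by omega
        have hk0' : min (0:Int) ((ds.length : Int)) = 0 := by omega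
        rw [hk0, hk0',
          PySem.List.slice_to (xs := L :: ds) (b := (0:Int)) (by omega),
          PySem.List.slice_to (xs := ds) (b := (0:Int)) (by omega)]
        simp only [Int.toNat_zero, List.take_zero, List.sum_nil]
        have m1 : min (r1 - 1) ((ds.length : Int) - 0) = min r1 ((ds.length : Int) + 1 - 0) - 1 := by omega
        rw [m1]
        have m2 : (ds.length : Int) - 0 - (min r1 ((ds.length : Int) + 1 - 0) - 1)
            = (ds.length : Int) + 1 - 0 - min r1 ((ds.length : Int) + 1 - 0) := by ring
        rw [m2]
        ring
      · have hr1' : r1 = 0 := by omega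
        subst hr1'
        rcases lt_or_ge 0 r2 with hr2 | hr2
        · -- a stone pick is available
          have hb : pvGo (ds.map (fun L => (L, it, s))) 0 (0 - 1) (0 + 0 - 1) (0 + 0 + r2 - 1)
              = pvGo (ds.map (fun L => (L, it, s))) 0 0 (0 + 0) ((0 + 0) + (r2 - 1)) := by
            apply pvGo_congr <;> omega
          rw [if_neg (by omega), if_neg (by omega), if_pos (by omega), hb,
            ih 0 0 (r2 - 1) (by omega) (by omega) (by omega)]
          have hk0 : min (0:Int) ((ds.length : Int) + 1) = 0 := by omega
          have hk0' : min (0:Int) ((ds.length : Int)) = 0 := by omega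
          rw [hk0, hk0',
            PySem.List.slice_to (xs := L :: ds) (b := (0:Int)) (by omega),
            PySem.List.slice_to (xs := ds) (b := (0:Int)) (by omega)]
          simp only [Int.toNat_zero, List.take_zero, List.sum_nil]
          have m1 : min (0:Int) ((ds.length : Int) - 0) = 0 := by omega
          have m1' : min (0:Int) ((ds.length : Int) + 1 - 0) = 0 := by omega
          rw [m1, m1']
          have m2 : min (r2 - 1) ((ds.length : Int) - 0 - 0) = min r2 ((ds.length : Int) + 1 - 0 - 0) - 1 := by omega
          rw [m2]
          ring
        · have hr2' : r2 = 0 := by omega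
          subst hr2'
          have hb : pvGo (ds.map (fun L => (L, it, s))) 0 (0 - 1) (0 + 0 - 1) (0 + 0 + 0 - 1)
              = pvGo (ds.map (fun L => (L, it, s))) 0 0 (0 + 0) ((0 + 0) + 0) := by
            apply pvGo_congr <;> omega
          rw [if_neg (by omega), if_neg (by omega), if_neg (by omega), hb,
            ih 0 0 0 (by omega) (by omega) (by omega)]
          have hk0 : min (0:Int) ((ds.length : Int) + 1) = 0 := by omega
          have hk0' : min (0:Int) ((ds.length : Int)) = 0 := by omega
          rw [hk0, hk0',
            PySem.List.slice_to (xs := L :: ds) (b := (0:Int)) (by omega),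
            PySem.List.slice_to (xs := ds) (b := (0:Int)) (by omega)]
          simp only [Int.toNat_zero, List.take_zero, List.sum_nil]
          have m1 : min (0:Int) ((ds.length : Int) - 0) = 0 := by omega
          have m1' : min (0:Int) ((ds.length : Int) + 1 - 0) = 0 := by omega
          rw [m1, m1']
          have m2 : min (0:Int) ((ds.length : Int) - 0 - 0) = 0 := by omega
          have m2' : min (0:Int) ((ds.length : Int) + 1 - 0 - 0) = 0 := by omega
          rw [m2, m2']
          ring

-- B's grid sweep equals the position view over the concatenated buckets
theorem pvSweep_go (g : Int × Int → List Int) :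
    ∀ (K : List (Int × Int)) (ans r0 r1 r2 : Int), 0 ≤ r0 → 0 ≤ r1 → 0 ≤ r2 →
      (K.foldl
        (fun st k =>
          let dias := g k
          if dias ≠ [] then
            let m : Int := (dias.length : Int)
            let k0 := min st.2.1 m
            let k1 := min st.2.2.1 (m - k0)
            let k2 := min st.2.2.2 (m - k0 - k1)
            (st.1 + (PySem.List.slice dias none (some k0)).sum + k1 * k.2 + k2 * k.1,
             st.2.1 - k0, st.2.2.1 - k1, st.2.2.2 - k2)
          else st)
        (ans, r0, r1, r2)).1
      = ans + pvGo (K.flatMap (fun k => (g k).map (fun L => (L, k.2, k.1)))) 0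
          r0 (r0 + r1) (r0 + r1 + r2) := by
  intro K
  induction K with
  | nil => intro ans r0 r1 r2 _ _ _; simp [pvGo]
  | cons k K' ih =>
    intro ans r0 r1 r2 h0 h1 h2
    simp only [List.foldl_cons, List.flatMap_cons]
    by_cases hd : g k = []
    · rw [if_neg (by simp [hd])]
      rw [ih ans r0 r1 r2 h0 h1 h2]
      simp [hd]
    · rw [if_pos (by simp [hd])]
      have hm0 : (0:Int) ≤ (g k).length := by positivity
      rw [ih _ _ _ _ (by omega) (by omega) (by omega)]
      rw [pvGo_append]
      rw [show ((0:Int) + ((g k).map (fun L => (L, k.2, k.1))).length)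
            = (0:Int) + (((g k).length : Nat) : Int) by simp]
      rw [show ((0:Int) + (((g k).length : Nat) : Int)) = (0 : Int) + ((g k).length : Nat) by norm_num]
      rw [pvGo_shiftn]
      rw [pvGo_block k.2 k.1 (g k) r0 r1 r2 h0 h1 h2]
      have hc : pvGo (K'.flatMap fun k => (g k).map fun L => (L, k.2, k.1)) 0
            (r0 - ((g k).length : Int)) (r0 + r1 - ((g k).length : Int)) (r0 + r1 + r2 - ((g k).length : Int))
          = pvGo (K'.flatMap fun k => (g k).map fun L => (L, k.2, k.1)) 0
            (r0 - min r0 ((g k).length : Int))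
            ((r0 - min r0 ((g k).length : Int)) + (r1 - min r1 (((g k).length : Int) - min r0 ((g k).length : Int))))
            ((r0 - min r0 ((g k).length : Int)) + (r1 - min r1 (((g k).length : Int) - min r0 ((g k).length : Int)))
              + (r2 - min r2 (((g k).length : Int) - min r0 ((g k).length : Int)
                  - min r1 (((g k).length : Int) - min r0 ((g k).length : Int))))) := by
        apply pvGo_congr <;> omega
      rw [hc]
      ring

-- the key grid B sweeps, as a list of (stone, iron) keys in descending order
def pvGrid : List (Int × Int) :=
  ((PySem.List.pyRange 1 126 1).reverse).flatMap
    (fun s => ((PySem.List.pyRange 1 26 1).reverse).map (fun it => (s, it)))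

theorem pvGrid_pairwise : pvGrid.Pairwise pvGt := by
  have hs : ((PySem.List.pyRange 1 126 1).reverse).Pairwise (fun a b => b < a) :=
    List.pairwise_reverse.mpr (PySem.List.pairwise_lt_pyRange_one 1 126)
  have hi : ((PySem.List.pyRange 1 26 1).reverse).Pairwise (fun a b => b < a) :=
    List.pairwise_reverse.mpr (PySem.List.pairwise_lt_pyRange_one 1 26)
  unfold pvGrid
  generalize ((PySem.List.pyRange 1 26 1).reverse) = its at hi
  generalize ((PySem.List.pyRange 1 126 1).reverse) = ss at hs ⊢
  induction hs with
  | nil => simp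
  | @cons s ss hss _ ih =>
    simp only [List.flatMap_cons]
    rw [List.pairwise_append]
    refine ⟨?_, ih, ?_⟩
    · rw [List.pairwise_map]
      exact hi.imp (fun {a b} hab => Or.inr ⟨rfl, hab⟩)
    · intro x hx y hy
      rcases List.mem_map.mp hx with ⟨it, _, rfl⟩
      rcases List.mem_flatMap.mp hy with ⟨s', hs', hy'⟩
      rcases List.mem_map.mp hy' with ⟨it', _, rfl⟩
      exact Or.inl (hss s' hs')

theorem pvGrid_mem (s it : Int) (hs1 : 1 ≤ s) (hs2 : s < 126) (hi1 : 1 ≤ it) (hi2 : it < 26) :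
    (s, it) ∈ pvGrid := by
  unfold pvGrid
  rw [List.mem_flatMap]
  refine ⟨s, ?_, ?_⟩
  · rw [List.mem_reverse, PySem.List.mem_pyRange_one]
    exact ⟨hs1, hs2⟩
  · rw [List.mem_map]
    refine ⟨it, ?_, rfl⟩
    rw [List.mem_reverse, PySem.List.mem_pyRange_one]
    exact ⟨hi1, hi2⟩

-- two different strings cannot account for more than all the elements
theorem pvTwoCount (l : List String) :
    List.count "diamond" l + List.count "iron" l ≤ l.length := by
  induction l with
  | nil => simp
  | cons x xs ih =>
    simp only [List.count_cons, List.length_cons]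
    by_cases hd : x = "diamond" <;> by_cases hi : x = "iron" <;>
      simp [hd, hi] at * <;> omega

-- the length of a 5-group: between 1 and 5
theorem pvChunkLen (ms : List String) (i : Int)
    (hi : i ∈ PySem.List.pyRange 0 (ms.length : Int) 5) :
    1 ≤ (PySem.List.slice ms (some i) (some (i + 5))).length ∧
      (PySem.List.slice ms (some i) (some (i + 5))).length ≤ 5 := by
  rcases (PySem.List.mem_pyRange_iff_of_pos (by omega) i).mp hi with ⟨h0, h1, _⟩
  rw [PySem.List.slice_toNat (xs := ms) h0 (by omega)]
  simp only [List.length_take, List.length_drop]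
  omega

-- the cost triple of every 5-group carries a key inside the grid
theorem pvCostKeyBounds (chunk : List String) (h1 : 1 ≤ chunk.length) (h5 : chunk.length ≤ 5) :
    pvKey (chunk.foldl pvCostStepA (0, 0, 0)) ∈ pvGrid := by
  have hf := pvCostA_fold chunk 0 0 0
  have h2 := pvTwoCount chunk
  rw [hf]
  simp only [pvKey]
  apply pvGrid_mem <;> omega

-- nested loop over the two ranges = one loop over the grid
theorem pvFoldl_grid {σ : Type} (F : σ → Int × Int → σ) :
    ∀ (ss : List Int) (its : List Int) (init : σ),
      ss.foldl (fun st s => its.foldl (fun st it => F st (s, it)) st) init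
        = (ss.flatMap (fun s => its.map (fun it => (s, it)))).foldl F init := by
  intro ss
  induction ss with
  | nil => intro its init; simp
  | cons s ss ih =>
    intro its init
    simp only [List.foldl_cons, List.flatMap_cons, List.foldl_append, ih, List.foldl_map]

-- bucket contents of key k, recovered as the filtered cost list
theorem pvBucket_filter (costs : List (Int × Int × Int)) (k : Int × Int) :
    ((((costs.map (fun c => (pvKey c, c.1))).filter (fun p => p.1 == k)).map (fun p => p.2)).map
        (fun L => (L, k.2, k.1)))
      = costs.filter (fun c => pvKey c = k) := by
  rw [List.filter_map, List.map_map, List.map_map]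
  have hp : ((fun p : (Int × Int) × Int => p.1 == k) ∘ (fun c : Int × Int × Int => (pvKey c, c.1)))
      = fun c => pvKey c == k := rfl
  rw [hp]
  have hfe : costs.filter (fun c => pvKey c == k) = costs.filter (fun c => pvKey c = k) := by
    apply List.filter_congr
    intro c _
    by_cases he : pvKey c = k <;> simp [he]
  rw [hfe]
  have hmapid : (costs.filter (fun c => pvKey c = k)).map
        (fun c : Int × Int × Int => ((c.1 : Int), k.2, k.1))
      = costs.filter (fun c => pvKey c = k) := by
    conv_rhs => rw [← List.map_id (costs.filter (fun c => pvKey c = k))]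
    apply List.map_congr_left
    intro c hc
    have hk : pvKey c = k := by simpa using (List.mem_filter.mp hc).2
    have h1 : c.2.2 = k.1 := congrArg Prod.fst hk
    have h2 : c.2.1 = k.2 := congrArg Prod.snd hk
    show ((c.1 : Int), k.2, k.1) = c
    rw [← h1, ← h2]
  exact hmapid


-- proof-side names for the pipeline's intermediate values (definitionally equal
-- to the corresponding subterms of the two ports)
def pvMs (picks : List Int) (minerals : List String) : List String :=
  PySem.List.slice minerals none (some (picks.sum * 5))

def pvCostF (ms : List String) (i : Int) : Int × Int × Int :=
  (PySem.List.slice ms (some i) (some (i + 5))).foldl pvCostStepA (0, 0, 0)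

def pvPairF (ms : List String) (i : Int) : (Int × Int) × Int :=
  ((24 * (PySem.List.count (PySem.List.slice ms (some i) (some (i + 5))) "diamond" : Int)
      + 4 * (PySem.List.count (PySem.List.slice ms (some i) (some (i + 5))) "iron" : Int)
      + ((PySem.List.slice ms (some i) (some (i + 5))).length : Int),
    4 * (PySem.List.count (PySem.List.slice ms (some i) (some (i + 5))) "diamond" : Int)
      + ((PySem.List.slice ms (some i) (some (i + 5))).length : Int),),
   ((PySem.List.slice ms (some i) (some (i + 5))).length : Int))

def pvBuckets (ms : List String) : PySem.Dict (Int × Int) (List Int) :=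
  (PySem.List.pyRange 0 (ms.length : Int) 5).foldl
    (fun d i =>
      let chunk := PySem.List.slice ms (some i) (some (i + 5))
      let dd : Int := PySem.List.count chunk "diamond"
      let r : Int := PySem.List.count chunk "iron"
      let L : Int := (chunk.length : Int)
      PySem.Dict.modify d (24 * dd + 4 * r + L, 4 * dd + L) [] (· ++ [L]))
    PySem.Dict.empty

def pvCapsE (picks : List Int) : List Int :=
  (PySem.List.slice picks none (some 3)).map (fun p => max p 0)
    ++ PySem.List.pyRepeat [(0 : Int)]
        (3 - (((PySem.List.slice picks none (some 3)).map (fun p => max p 0)).length : Int))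

theorem pvFlatMap_congr {α β : Type} (K : List α) (f g : α → List β)
    (h : ∀ k ∈ K, f k = g k) : K.flatMap f = K.flatMap g := by
  induction K with
  | nil => rfl
  | cons k K ih =>
    simp only [List.flatMap_cons, h k (by simp)]
    rw [ih (fun k hk => h k (by simp [hk]))]

theorem pvBuckets_getD (ms : List String) (k : Int × Int) :
    PySem.Dict.getD (pvBuckets ms) k []
      = (((PySem.List.pyRange 0 (ms.length : Int) 5).map (pvPairF ms)).filter
          (fun p => p.1 == k)).map (fun p => p.2) := by
  have hfold : pvBuckets ms
      = ((PySem.List.pyRange 0 (ms.length : Int) 5).map (pvPairF ms)).foldl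
          (fun d p => d.modify p.1 [] (fun x => x ++ [p.2])) PySem.Dict.empty := by
    rw [List.foldl_map]
    rfl
  rw [hfold, PySem.Dict.getD_foldl_modify_append]
  rw [show PySem.Dict.getD (PySem.Dict.empty : PySem.Dict (Int × Int) (List Int)) k []
        = [] from rfl,
    List.nil_append]

theorem pvPairs_eq (ms : List String) :
    (PySem.List.pyRange 0 (ms.length : Int) 5).map (pvPairF ms)
      = ((PySem.List.pyRange 0 (ms.length : Int) 5).map (pvCostF ms)).map
          (fun c => (pvKey c, c.1)) := by
  rw [List.map_map]
  apply List.map_congr_left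
  intro i _
  show pvPairF ms i = (pvKey (pvCostF ms i), (pvCostF ms i).1)
  unfold pvPairF pvCostF
  rw [pvCostA_fold]
  simp only [pvKey, PySem.List.count_eq, Prod.mk.injEq]
  refine ⟨⟨by omega, by omega⟩, by omega⟩

theorem pvMemGrid (ms : List String) :
    ∀ c ∈ (PySem.List.pyRange 0 (ms.length : Int) 5).map (pvCostF ms),
      pvKey c ∈ pvGrid := by
  intro c hc
  rcases List.mem_map.mp hc with ⟨i, hi, rfl⟩
  have h := pvChunkLen ms i hi
  exact pvCostKeyBounds _ h.1 h.2

theorem pvCapsE_nil : pvCapsE ([] : List Int) = [0, 0, 0] := rfl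

theorem pvCapsE_one (p0 : Int) : pvCapsE [p0] = [max p0 0, 0, 0] := by
  unfold pvCapsE
  rw [PySem.List.slice_to (xs := [p0]) (by omega)]
  rfl

theorem pvCapsE_two (p0 p1 : Int) : pvCapsE [p0, p1] = [max p0 0, max p1 0, 0] := by
  unfold pvCapsE
  rw [PySem.List.slice_to (xs := [p0, p1]) (by omega)]
  rfl

theorem pvCapsE_big (p0 p1 p2 : Int) (t : List Int) :
    pvCapsE (p0 :: p1 :: p2 :: t) = [max p0 0, max p1 0, max p2 0] := by
  unfold pvCapsE
  rw [PySem.List.slice_to (xs := p0 :: p1 :: p2 :: t) (by omega)]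
  rw [show ((3 : Int).toNat) = 3 from rfl,
    show List.take 3 (p0 :: p1 :: p2 :: t) = [p0, p1, p2] from rfl]
  rfl

theorem pvCaps_eval (picks : List Int) :
    PySem.List.pyGetD (pvCapsE picks) 0 0 = pvCap picks 0
  ∧ PySem.List.pyGetD (pvCapsE picks) 1 0 = pvCap picks 1
  ∧ PySem.List.pyGetD (pvCapsE picks) 2 0 = pvCap picks 2 := by
  rcases picks with _ | ⟨p0, _ | ⟨p1, _ | ⟨p2, t⟩⟩⟩ <;>
    refine ⟨?_, ?_, ?_⟩ <;>
      simp only [pvCapsE_nil, pvCapsE_one, pvCapsE_two, pvCapsE_big,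
        pvGet0, pvGet1, pvGet2, pvCap0, pvCap1, pvCap2, pvCapN0, pvCapN1, pvCapN2,
        pvCapS1, pvCapS2, pvCapD2]

-- ===== VERDICT (by name: the statement is the Claim_ definition above) =====
set_option maxRecDepth 8192 in
theorem solution_spec : Claim_equal_solution := by
  unfold Claim_equal_solution
  intro picks minerals _ _
  unfold Spec_solution
  obtain ⟨hc0, hc1, hc2⟩ := pvCaps_eval picks
  have h0 : 0 ≤ pvCap picks 0 := le_max_right _ 0
  have h1 : 0 ≤ pvCap picks 1 := le_max_right _ 0
  have h2 : 0 ≤ pvCap picks 2 := le_max_right _ 0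
  calc solution picks minerals
      = ((PySem.List.sorted2
            (((PySem.List.pyRange 0 ((pvMs picks minerals).length : Int) 5).map
                (fun i => PySem.List.slice (pvMs picks minerals) (some i) (some (i + 5)))).foldl
              (fun acc mineral => acc ++ [mineral.foldl pvCostStepA (0, 0, 0)]) [])
            (fun x => -x.2.2) (fun x => -x.2.1)).foldl pvStepA (0, picks)).1 := rfl
    _ = ((PySem.List.sorted2
            ((PySem.List.pyRange 0 ((pvMs picks minerals).length : Int) 5).map
              (pvCostF (pvMs picks minerals)))
            (fun x => -x.2.2) (fun x => -x.2.1)).foldl pvStepA (0, picks)).1 := by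
          rw [PySem.List.foldl_append_singleton_eq_map, List.nil_append, List.map_map]
          rfl
    _ = 0 + pvGo (PySem.List.sorted2
            ((PySem.List.pyRange 0 ((pvMs picks minerals).length : Int) 5).map
              (pvCostF (pvMs picks minerals)))
            (fun x => -x.2.2) (fun x => -x.2.1)) 0
          (pvCap picks 0) (pvCap picks 0 + pvCap picks 1)
          (pvCap picks 0 + pvCap picks 1 + pvCap picks 2) := pvGreedy_go _ picks 0
    _ = 0 + pvGo (pvGrid.flatMap (fun k =>
            ((PySem.List.pyRange 0 ((pvMs picks minerals).length : Int) 5).map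
              (pvCostF (pvMs picks minerals))).filter (fun c => pvKey c = k))) 0
          (pvCap picks 0) (pvCap picks 0 + pvCap picks 1)
          (pvCap picks 0 + pvCap picks 1 + pvCap picks 2) := by
          rw [pvSorted_eq_flatMap _ pvGrid pvGrid_pairwise (pvMemGrid _)]
    _ = 0 + pvGo (pvGrid.flatMap (fun k =>
            (PySem.Dict.getD (pvBuckets (pvMs picks minerals)) k []).map
              (fun L => (L, k.2, k.1)))) 0
          (pvCap picks 0) (pvCap picks 0 + pvCap picks 1)
          (pvCap picks 0 + pvCap picks 1 + pvCap picks 2) := by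
          rw [← pvFlatMap_congr pvGrid
            (fun k => (PySem.Dict.getD (pvBuckets (pvMs picks minerals)) k []).map
              (fun L => (L, k.2, k.1)))
            (fun k => ((PySem.List.pyRange 0 ((pvMs picks minerals).length : Int) 5).map
              (pvCostF (pvMs picks minerals))).filter (fun c => pvKey c = k))
            (fun k _ => by
              show (PySem.Dict.getD (pvBuckets (pvMs picks minerals)) k []).map
                    (fun L => (L, k.2, k.1))
                  = ((PySem.List.pyRange 0 ((pvMs picks minerals).length : Int) 5).map
                      (pvCostF (pvMs picks minerals))).filter (fun c => pvKey c = k)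
              rw [pvBuckets_getD, pvPairs_eq]
              exact pvBucket_filter _ k)]
    _ = (pvGrid.foldl
          (fun st k =>
            let dias := PySem.Dict.getD (pvBuckets (pvMs picks minerals)) k []
            if dias ≠ [] then
              let m : Int := (dias.length : Int)
              let k0 := min st.2.1 m
              let k1 := min st.2.2.1 (m - k0)
              let k2 := min st.2.2.2 (m - k0 - k1)
              (st.1 + (PySem.List.slice dias none (some k0)).sum + k1 * k.2 + k2 * k.1,
               st.2.1 - k0, st.2.2.1 - k1, st.2.2.2 - k2)
            else st)
          ((0 : Int), pvCap picks 0, pvCap picks 1, pvCap picks 2)).1 :=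
        (pvSweep_go (fun k => PySem.Dict.getD (pvBuckets (pvMs picks minerals)) k [])
          pvGrid 0 _ _ _ h0 h1 h2).symm
    _ = (((PySem.List.pyRange 1 126 1).reverse).foldl
          (fun st s => ((PySem.List.pyRange 1 26 1).reverse).foldl
            (fun st it =>
              (fun st (k : Int × Int) =>
                let dias := PySem.Dict.getD (pvBuckets (pvMs picks minerals)) k []
                if dias ≠ [] then
                  let m : Int := (dias.length : Int)
                  let k0 := min st.2.1 m
                  let k1 := min st.2.2.1 (m - k0)
                  let k2 := min st.2.2.2 (m - k0 - k1)
                  (st.1 + (PySem.List.slice dias none (some k0)).sum + k1 * k.2 + k2 * k.1,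
                   st.2.1 - k0, st.2.2.1 - k1, st.2.2.2 - k2)
                else st) st (s, it)) st)
          ((0 : Int), pvCap picks 0, pvCap picks 1, pvCap picks 2)).1 :=
        congrArg (fun x : Int × Int × Int × Int => x.1) (pvFoldl_grid _ _ _ _).symm
    _ = solution_alt picks minerals := by
          rw [← hc0, ← hc1, ← hc2]
          rfl
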